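-- pv_equiv track=rewrite | github.com/NiceTry3675/Context-Aware-Translation | core/translation/illustration/visual_extractor.py | get_character_descriptions
-- ===== SOURCE A (Python) =====
-- from typing import Dict, Any, List, Optional
--
-- def get_character_descriptions(character_names: List[str], segment_text: str) -> List[str]:
--     """
--     Convert character names to generic visual descriptions for illustration.
--     Avoids using actual names to prevent them from appearing as text in images.
--
--     Args:
--         character_names: List of character names found in the segment
--         segment_text: The text segment for context
--
--     Returns:
--         List of generic character descriptions
--     """
--     descriptions = []
--
--     # Map common character archetypes based on context clues
--     text_lower = segment_text.lower()
--
--     # Create more varied descriptions based on the number of characters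
--     num_characters = len(character_names)
--
--     if num_characters == 1:
--         # Single character - try to be more descriptive
--         if any(word in text_lower for word in ['child', 'boy', 'kid', 'young']):
--             descriptions.append("a young boy")
--         elif any(word in text_lower for word in ['girl', 'young woman']):
--             descriptions.append("a young woman")
--         elif any(word in text_lower for word in ['woman', 'lady', 'female']):
--             descriptions.append("a woman")
--         elif any(word in text_lower for word in ['man', 'gentleman', 'male']):
--             descriptions.append("a man")
--         elif any(word in text_lower for word in ['old', 'elderly', 'aged', 'senior']):
--             descriptions.append("an elderly person")
--         else:
--             descriptions.append("a person")
--
--     elif num_characters == 2: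
--         # Two characters - show them in conversation or interaction
--         if any(word in text_lower for word in ['talking', 'conversation', 'discussing', 'arguing']):
--             descriptions.append("two people in conversation")
--         elif any(word in text_lower for word in ['fighting', 'combat', 'battle']):
--             descriptions.append("two people in confrontation")
--         elif any(word in text_lower for word in ['embracing', 'hugging', 'holding']):
--             descriptions.append("two people embracing")
--         else:
--             descriptions.append("two people together")
--
--     elif num_characters >= 3:
--         # Multiple characters - describe as a group
--         if any(word in text_lower for word in ['meeting', 'gathering', 'assembled']):
--             descriptions.append("a group of people gathered")
--         elif any(word in text_lower for word in ['crowd', 'audience']):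
--             descriptions.append("a crowd of people")
--         elif any(word in text_lower for word in ['team', 'squad', 'group']):
--             descriptions.append("a team of people")
--         else:
--             descriptions.append(f"a group of {num_characters} people")
--
--     # If we still have no descriptions, use generic fallback
--     if not descriptions:
--         if num_characters == 1:
--             descriptions.append("a person")
--         elif num_characters == 2:
--             descriptions.append("two people")
--         else:
--             descriptions.append("several people")
--
--     return descriptions
-- ===== SOURCE B (Python) =====
-- def get_character_descriptions(character_names, segment_text):
--     n = len(character_names)
--     if n == 0:
--         return ["several people"]
--     if n == 1:
--         pairs = [("child", "a young boy"), ("boy", "a young boy"),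
--                  ("kid", "a young boy"), ("young", "a young boy"),
--                  ("girl", "a young woman"), ("young woman", "a young woman"),
--                  ("woman", "a woman"), ("lady", "a woman"), ("female", "a woman"),
--                  ("man", "a man"), ("gentleman", "a man"), ("male", "a man"),
--                  ("old", "an elderly person"), ("elderly", "an elderly person"),
--                  ("aged", "an elderly person"), ("senior", "an elderly person")]
--         result = "a person"
--     elif n == 2:
--         pairs = [("talking", "two people in conversation"),
--                  ("conversation", "two people in conversation"),
--                  ("discussing", "two people in conversation"),
--                  ("arguing", "two people in conversation"),
--                  ("fighting", "two people in confrontation"),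
--                  ("combat", "two people in confrontation"),
--                  ("battle", "two people in confrontation"),
--                  ("embracing", "two people embracing"),
--                  ("hugging", "two people embracing"),
--                  ("holding", "two people embracing")]
--         result = "two people together"
--     else:
--         pairs = [("meeting", "a group of people gathered"),
--                  ("gathering", "a group of people gathered"),
--                  ("assembled", "a group of people gathered"),
--                  ("crowd", "a crowd of people"),
--                  ("audience", "a crowd of people"),
--                  ("team", "a team of people"),
--                  ("squad", "a team of people"),
--                  ("group", "a team of people")]
--         result = f"a group of {n} people"
--     text = segment_text.lower()
--     # lowest-priority matches are applied first and overwritten by higher ones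
--     for keyword, description in reversed(pairs):
--         if keyword in text:
--             result = description
--     return [result]
-- ===== Notes on version B (the rewrite author's own statement) =====
-- stated objective: alternative
-- what changed: Replaces A's three group-level any-keyword if/elif cascades with early returns by a flat keyword-to-description priority list per character-count category, traversed in reverse with an overwrite accumulator (last write wins) so the highest-priority matching keyword's description survives, plus an explicit n==0 early return.
import Mathlib
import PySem

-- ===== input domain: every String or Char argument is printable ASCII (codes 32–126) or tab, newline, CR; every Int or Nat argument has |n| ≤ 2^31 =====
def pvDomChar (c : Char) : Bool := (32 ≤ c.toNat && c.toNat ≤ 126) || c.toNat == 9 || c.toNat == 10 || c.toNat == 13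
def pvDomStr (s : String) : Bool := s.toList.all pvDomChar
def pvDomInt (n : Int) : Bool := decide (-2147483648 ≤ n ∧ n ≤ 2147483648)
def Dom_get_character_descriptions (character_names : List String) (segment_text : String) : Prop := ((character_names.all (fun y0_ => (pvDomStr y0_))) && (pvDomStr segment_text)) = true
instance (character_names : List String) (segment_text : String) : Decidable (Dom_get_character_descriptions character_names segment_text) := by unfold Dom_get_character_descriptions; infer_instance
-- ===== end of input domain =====

-- B replaces A's group-level any-match if/elif cascades with a flat keyword→description priority list traversed in REVERSE with an overwrite accumulator (objective: simpler/alternative).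

-- ===== PORT A =====
def get_character_descriptions (character_names : List String) (segment_text : String) : List String :=
  let text_lower := PySem.Str.lower segment_text
  let num_characters := character_names.length
  let descriptions : List String :=
    if num_characters = 1 then
      if ["child", "boy", "kid", "young"].any (fun w => PySem.Str.isIn w text_lower) then ["a young boy"]
      else if ["girl", "young woman"].any (fun w => PySem.Str.isIn w text_lower) then ["a young woman"]
      else if ["woman", "lady", "female"].any (fun w => PySem.Str.isIn w text_lower) then ["a woman"]
      else if ["man", "gentleman", "male"].any (fun w => PySem.Str.isIn w text_lower) then ["a man"]
      else if ["old", "elderly", "aged", "senior"].any (fun w => PySem.Str.isIn w text_lower) then ["an elderly person"]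
      else ["a person"]
    else if num_characters = 2 then
      if ["talking", "conversation", "discussing", "arguing"].any (fun w => PySem.Str.isIn w text_lower) then ["two people in conversation"]
      else if ["fighting", "combat", "battle"].any (fun w => PySem.Str.isIn w text_lower) then ["two people in confrontation"]
      else if ["embracing", "hugging", "holding"].any (fun w => PySem.Str.isIn w text_lower) then ["two people embracing"]
      else ["two people together"]
    else if 3 ≤ num_characters then
      if ["meeting", "gathering", "assembled"].any (fun w => PySem.Str.isIn w text_lower) then ["a group of people gathered"]
      else if ["crowd", "audience"].any (fun w => PySem.Str.isIn w text_lower) then ["a crowd of people"]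
      else if ["team", "squad", "group"].any (fun w => PySem.Str.isIn w text_lower) then ["a team of people"]
      else ["a group of " ++ PySem.Int.toStr (num_characters : Int) ++ " people"]
    else []
  if descriptions = [] then
    if num_characters = 1 then ["a person"]
    else if num_characters = 2 then ["two people"]
    else ["several people"]
  else descriptions

-- ===== PORT B =====
def get_character_descriptions_alt (character_names : List String) (segment_text : String) : List String :=
  let n := character_names.length
  if n = 0 then ["several people"]
  else
    let table : List (String × String) × String :=
      if n = 1 then
        ([("child", "a young boy"), ("boy", "a young boy"),
          ("kid", "a young boy"), ("young", "a young boy"),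
          ("girl", "a young woman"), ("young woman", "a young woman"),
          ("woman", "a woman"), ("lady", "a woman"), ("female", "a woman"),
          ("man", "a man"), ("gentleman", "a man"), ("male", "a man"),
          ("old", "an elderly person"), ("elderly", "an elderly person"),
          ("aged", "an elderly person"), ("senior", "an elderly person")],
         "a person")
      else if n = 2 then
        ([("talking", "two people in conversation"),
          ("conversation", "two people in conversation"),
          ("discussing", "two people in conversation"),
          ("arguing", "two people in conversation"),
          ("fighting", "two people in confrontation"),
          ("combat", "two people in confrontation"),
          ("battle", "two people in confrontation"),
          ("embracing", "two people embracing"),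
          ("hugging", "two people embracing"),
          ("holding", "two people embracing")],
         "two people together")
      else
        ([("meeting", "a group of people gathered"),
          ("gathering", "a group of people gathered"),
          ("assembled", "a group of people gathered"),
          ("crowd", "a crowd of people"),
          ("audience", "a crowd of people"),
          ("team", "a team of people"),
          ("squad", "a team of people"),
          ("group", "a team of people")],
         "a group of " ++ PySem.Int.toStr (n : Int) ++ " people")
    let text := PySem.Str.lower segment_text
    -- for keyword, description in reversed(pairs): if keyword in text: result = description
    [table.1.reverse.foldl
      (fun result p => if PySem.Str.isIn p.1 text then p.2 else result) table.2]

-- ===== PRECONDITION & SPEC =====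
def Spec_get_character_descriptions (character_names : List String) (segment_text : String) (out : List String) : Prop := out = get_character_descriptions_alt character_names segment_text
instance (character_names : List String) (segment_text : String) (out : List String) : Decidable (Spec_get_character_descriptions character_names segment_text out) := by unfold Spec_get_character_descriptions; infer_instance

-- ===== CLAIM (what is proved, stated in full; the proofs are below) =====
def Claim_equal_get_character_descriptions : Prop := ∀ (character_names : List String) (segment_text : String), Dom_get_character_descriptions character_names segment_text → Spec_get_character_descriptions character_names segment_text (get_character_descriptions character_names segment_text)

-- ===== LEMMAS AND PROOFS =====

-- two consecutive first-match tests with the same result collapse into one disjunction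
theorem gcd_merge_if {α : Type} (a b : Prop) [Decidable a] [Decidable b] (d r : α) :
    (if a then d else if b then d else r) = (if a ∨ b then d else r) := by
  split_ifs <;> tauto

-- an if-then-else of singleton lists is a singleton of an if-then-else
theorem gcd_if_push {α : Type} (c : Prop) [Decidable c] (x y : α) :
    (if c then [x] else [y]) = [if c then x else y] := by
  split <;> rfl

-- ===== VERDICT (by name: the statement is the Claim_ definition above) =====
theorem get_character_descriptions_spec : Claim_equal_get_character_descriptions := by
  intro character_names segment_text _
  unfold Spec_get_character_descriptions
  unfold get_character_descriptions get_character_descriptions_alt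
  match h : character_names.length with
  | 0 => simp
  | 1 => simp [gcd_merge_if, gcd_if_push]
  | 2 => simp [gcd_merge_if, gcd_if_push]
  | (n+3) => simp [gcd_merge_if, gcd_if_push]
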